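-- pv_equiv track=rewrite | github.com/AshuMishraG/LeetCode | 1500-count-largest-group/1500-count-largest-group.py | countLargestGroup_single_pass
-- ===== SOURCE A (Python) =====
-- def countLargestGroup_single_pass(n: int) -> int:
--     def get_digit_sum(num: int) -> int:
--         s = 0
--         while num > 0:
--             s += num % 10
--             num //= 10
--         return s
--
--     group_counts = [0] * 37
--     for i in range(1, n + 1):
--         digit_sum = get_digit_sum(i)
--         if 1 <= digit_sum < len(group_counts):
--             group_counts[digit_sum] += 1
--
--     max_size = 0
--     result_count = 0
--     # Iterate counts (index 1 to 36) to find max and count simultaneously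
--     for size in group_counts[1:]:
--         if size > max_size:
--             max_size = size
--             result_count = 1  # Reset count for the new max size
--         elif size == max_size:
--             # Only increment if max_size is actually positive
--             # Ensures we don't count groups of size 0 if n is small
--             if max_size > 0:
--                 result_count += 1 # Another group matches the current max
--
--     return result_count
-- ===== SOURCE B (Python) =====
-- def countLargestGroup_single_pass(n: int) -> int:
--     # Count, for each digit-sum bucket 1..36 (A's bucket range), how many
--     # x in [1, n] have that digit sum -- by digit DP instead of scanning 1..n.
--     memo = {}
--
--     def cnt(m: int, s: int) -> int:
--         # numbers x in [0, m] with digit sum exactly s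
--         if m < 0 or s < 0:
--             return 0
--         if m == 0:
--             return 1 if s == 0 else 0
--         key = (m, s)
--         if key not in memo:
--             memo[key] = sum(cnt((m - d) // 10, s - d) for d in range(10) if d <= m)
--         return memo[key]
--
--     counts = [cnt(n, s) for s in range(1, 37)]
--     m = max(counts)
--     return counts.count(m) if m > 0 else 0
-- ===== Notes on version B (the rewrite author's own statement) =====
-- stated objective: faster
-- what changed: Instead of computing the digit sum of every i in 1..n and tallying buckets, B counts the numbers in [1,n] having each digit sum 1..36 directly with a memoised last-digit recursion (digit DP), then takes the max bucket and counts its ties.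
import Mathlib
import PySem

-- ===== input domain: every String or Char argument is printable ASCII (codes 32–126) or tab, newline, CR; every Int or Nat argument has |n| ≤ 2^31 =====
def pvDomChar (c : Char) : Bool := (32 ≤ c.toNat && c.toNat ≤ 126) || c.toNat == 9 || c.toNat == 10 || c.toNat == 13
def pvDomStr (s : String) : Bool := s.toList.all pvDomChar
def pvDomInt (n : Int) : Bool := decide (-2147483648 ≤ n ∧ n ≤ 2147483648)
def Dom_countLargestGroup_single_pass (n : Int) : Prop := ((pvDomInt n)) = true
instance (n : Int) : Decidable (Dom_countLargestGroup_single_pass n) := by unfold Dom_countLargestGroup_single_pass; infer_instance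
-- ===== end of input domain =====

-- B replaces A's O(n) scan of every number in 1..n by a memoised digit-sum count per bucket (objective: faster).

-- ===== PORT A =====
-- helper get_digit_sum: s = 0; while num > 0: s += num % 10; num //= 10; return s
def pvGetDigitSum (num : Int) : Int :=
  if h : 0 < num then
    PySem.Int.mod num 10 + pvGetDigitSum (PySem.Int.floordiv num 10)
  else 0
termination_by num.toNat
decreasing_by
  rw [PySem.Int.floordiv_eq_ediv_of_pos (by omega : (0:Int) < 10)]
  omega

-- body of A's first loop: digit_sum = get_digit_sum(i); if 1 <= digit_sum < len(group_counts): group_counts[digit_sum] += 1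
def pvLoopBody (gc : List Int) (i : Int) : List Int :=
  let ds := pvGetDigitSum i
  if 1 ≤ ds ∧ ds < PySem.List.len gc then
    PySem.List.pySetD gc ds (PySem.List.pyGetD gc ds 0 + 1)
  else gc

-- body of A's second loop over group_counts[1:], state (max_size, result_count)
def pvScanBody (p : Int × Int) (size : Int) : Int × Int :=
  if size > p.1 then (size, 1)
  else if size = p.1 then (if p.1 > 0 then (p.1, p.2 + 1) else p)
  else p

def countLargestGroup_single_pass (n : Int) : Int :=
  let gc := (PySem.List.pyRange 1 (n + 1) 1).foldl pvLoopBody (List.replicate 37 0)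
  ((PySem.List.slice gc (some 1) none).foldl pvScanBody (0, 0)).2

-- ===== PORT B =====
-- Source B's cnt(m, s) = #{x in [0, m] : digit sum of x = s}; Source B memoises this recursion
-- in a dict — the memo does not change values, so it is ported as the plain recursion.
def pvCnt (m : Int) (s : Int) : Int :=
  if h0 : m < 0 ∨ s < 0 then 0
  else if hm : m = 0 then (if s = 0 then 1 else 0)
  else ((List.range 10).map (fun (d : Nat) =>
      if hd : (d : Int) ≤ m then
        pvCnt (PySem.Int.floordiv (m - (d : Int)) 10) (s - (d : Int))
      else 0)).sum
termination_by m.toNat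
decreasing_by
  rw [PySem.Int.floordiv_eq_ediv_of_pos (by omega : (0:Int) < 10)]
  omega

def countLargestGroup_single_pass_alt (n : Int) : Int :=
  let counts := (PySem.List.pyRange 1 37 1).map (fun s => pvCnt n s)
  match PySem.List.max? counts (fun x => x) with
  | some m => if m > 0 then (PySem.List.count counts m : Int) else 0
  | none => 0

-- ===== PRECONDITION & SPEC =====
def Spec_countLargestGroup_single_pass (n : Int) (out : Int) : Prop := out = countLargestGroup_single_pass_alt n
instance (n : Int) (out : Int) : Decidable (Spec_countLargestGroup_single_pass n out) := by unfold Spec_countLargestGroup_single_pass; infer_instance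

-- ===== CLAIM (what is proved, stated in full; the proofs are below) =====
def Claim_equal_countLargestGroup_single_pass : Prop := ∀ (n : Int), Dom_countLargestGroup_single_pass n → Spec_countLargestGroup_single_pass n (countLargestGroup_single_pass n)

-- ===== LEMMAS AND PROOFS =====

lemma fdiv10 (a : Int) : PySem.Int.floordiv a 10 = a / 10 :=
  PySem.Int.floordiv_eq_ediv_of_pos (by norm_num)

lemma fmod10 (a : Int) : PySem.Int.mod a 10 = a % 10 :=
  PySem.Int.mod_eq_emod_of_pos (by norm_num)

lemma pvGetDigitSum_pos (m : Int) (h : 0 < m) :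
    pvGetDigitSum m = PySem.Int.mod m 10 + pvGetDigitSum (PySem.Int.floordiv m 10) := by
  rw [pvGetDigitSum]; simp [h]

lemma pvGetDigitSum_nonpos (m : Int) (h : ¬ 0 < m) : pvGetDigitSum m = 0 := by
  rw [pvGetDigitSum]; simp [h]

lemma pvGetDigitSum_small (m : Int) (h1 : 0 < m) (h9 : m ≤ 9) : pvGetDigitSum m = m := by
  rw [pvGetDigitSum_pos m h1, fmod10, fdiv10]
  rw [show m % 10 = m by omega, show m / 10 = 0 by omega, pvGetDigitSum_nonpos 0 (by omega)]
  ring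

lemma pvGetDigitSum_decomp (m : Int) (h : 0 < m) :
    pvGetDigitSum m = m % 10 + pvGetDigitSum (m / 10) := by
  rw [pvGetDigitSum_pos m h, fmod10, fdiv10]

lemma pvCnt_neg (m s : Int) (h : m < 0 ∨ s < 0) : pvCnt m s = 0 := by
  rw [pvCnt.eq_def]; simp [h]

lemma pvCnt_zero (s : Int) : pvCnt 0 s = if s = 0 then 1 else 0 := by
  rw [pvCnt.eq_def]
  split_ifs <;> simp_all

-- pvCnt m s written as its own one-level unfolding, valid for every m ≥ 0 and every s
lemma pvCnt_sum (m s : Int) (h : 0 ≤ m) :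
    pvCnt m s = ((List.range 10).map (fun (d : Nat) =>
      if (d : Int) ≤ m then pvCnt (PySem.Int.floordiv (m - (d:Int)) 10) (s - (d:Int)) else 0)).sum := by
  rcases eq_or_lt_of_le h with h0 | h1
  · rw [← h0, pvCnt_zero]
    norm_num [show List.range 10 = [0,1,2,3,4,5,6,7,8,9] from rfl, fdiv10, pvCnt_zero]
  · by_cases hs : s < 0
    · have hterm : ∀ d : Nat, pvCnt ((m - (d:Int)) / 10) (s - (d:Int)) = 0 :=
        fun d => pvCnt_neg _ _ (Or.inr (by omega))
      rw [pvCnt_neg _ _ (Or.inr hs)]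
      simp [hterm]
    · rw [pvCnt.eq_def]
      simp only [dite_eq_ite]
      rw [if_neg (by omega), if_neg (by omega)]

-- the key step: removing the top number m from [0, m] changes pvCnt by exactly one hit
lemma pvCnt_step (m : Int) (h : 1 ≤ m) (s : Int) :
    pvCnt m s = pvCnt (m - 1) s + (if pvGetDigitSum m = s then 1 else 0) := by
  generalize hk : m.toNat = k
  induction k using Nat.strong_induction_on generalizing m s with
  | _ k IH =>
  rw [pvCnt_sum m s (by omega), pvCnt_sum (m-1) s (by omega)]
  have hsplit : ∀ d ∈ List.range 10,
      (if (d : Int) ≤ m then pvCnt (PySem.Int.floordiv (m - (d:Int)) 10) (s - (d:Int)) else 0)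
      = (if (d : Int) ≤ m - 1 then pvCnt (PySem.Int.floordiv (m - 1 - (d:Int)) 10) (s - (d:Int)) else 0)
        + (if (d : Int) = m % 10 then (if pvGetDigitSum m = s then 1 else 0) else 0) := by
    intro d hd
    have hd10 : d < 10 := List.mem_range.mp hd
    rw [fdiv10, fdiv10]
    by_cases hdr : (d : Int) = m % 10
    · rw [if_pos hdr]
      by_cases hdm1 : (d : Int) ≤ m - 1
      · rw [if_pos (by omega), if_pos hdm1]
        have hqd : (m - (d:Int)) / 10 = m / 10 := by omega
        have hqd' : (m - 1 - (d:Int)) / 10 = m / 10 - 1 := by omega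
        rw [hqd, hqd']
        have := IH (m / 10).toNat (by omega) (m / 10) (by omega) (s - (d:Int)) rfl
        rw [this]
        have hds : pvGetDigitSum m = m % 10 + pvGetDigitSum (m / 10) := pvGetDigitSum_decomp m (by omega)
        have hiff : (pvGetDigitSum (m / 10) = s - (d:Int)) ↔ (pvGetDigitSum m = s) := by
          rw [hds]; omega
        rw [if_congr hiff rfl rfl]
      · have hm9 : m ≤ 9 := by omega
        rw [if_pos (by omega), if_neg hdm1]
        rw [show (m - (d:Int)) / 10 = 0 by omega, pvCnt_zero]
        rw [pvGetDigitSum_small m (by omega) hm9]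
        have : (s - (d:Int) = 0) ↔ (m = s) := by omega
        rw [if_congr this rfl rfl]
        ring
    · rw [if_neg hdr]
      by_cases hdm : (d : Int) ≤ m - 1
      · rw [if_pos (by omega), if_pos hdm]
        rw [show (m - (d:Int)) / 10 = (m - 1 - (d:Int)) / 10 by omega]
        ring
      · rw [if_neg (by omega), if_neg hdm]
        ring
  rw [List.map_congr_left hsplit]
  rw [PySem.List.sum_map_add_int]
  congr 1
  have hrc : m % 10 = 0 ∨ m % 10 = 1 ∨ m % 10 = 2 ∨ m % 10 = 3 ∨ m % 10 = 4 ∨ m % 10 = 5 ∨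
      m % 10 = 6 ∨ m % 10 = 7 ∨ m % 10 = 8 ∨ m % 10 = 9 := by omega
  rcases hrc with h'|h'|h'|h'|h'|h'|h'|h'|h'|h' <;>
    rw [h'] <;>
    norm_num [show List.range 10 = [0,1,2,3,4,5,6,7,8,9] from rfl]

lemma pvCnt_nonneg (m s : Int) : 0 ≤ pvCnt m s := by
  generalize hk : m.toNat = k
  induction k using Nat.strong_induction_on generalizing m s with
  | _ k IH =>
  rw [pvCnt.eq_def]
  split_ifs with h0 hm hs
  · norm_num
  · norm_num
  · norm_num
  · apply List.sum_nonneg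
    intro x hx
    obtain ⟨d, hd, rfl⟩ := List.mem_map.mp hx
    split
    · exact IH (PySem.Int.floordiv (m - (d:Int)) 10).toNat
        (by rw [fdiv10]; omega) _ _ rfl
    · exact le_refl 0

-- the exact contents of A's group_counts after the first loop over 1..n
def pvCounts (n : Int) : List Int := 0 :: (List.range 36).map (fun (j : Nat) => pvCnt n (1 + (j:Int)))

lemma pvCounts_length (n : Int) : (pvCounts n).length = 37 := by
  simp [pvCounts]

lemma pvCounts_get (n : Int) (i : Nat) (h : i < 37) :
    (pvCounts n)[i]'(by rw [pvCounts_length]; omega) = if i = 0 then 0 else pvCnt n (i : Int) := by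
  match i with
  | 0 => rfl
  | (j+1) =>
    have hj : j < 36 := by omega
    rw [if_neg (Nat.succ_ne_zero j)]
    simp only [pvCounts, List.getElem_cons_succ, List.getElem_map, List.getElem_range]
    congr 1
    push_cast
    ring

lemma pvCounts_nonpos (n : Int) (h : n ≤ 0) : pvCounts n = List.replicate 37 0 := by
  apply List.ext_getElem (by simp [pvCounts_length])
  intro i h1 h2
  rw [pvCounts_get n i (by rwa [pvCounts_length] at h1), List.getElem_replicate]
  rcases lt_or_ge n 0 with hn | hn
  · simp [pvCnt_neg n _ (Or.inl hn)]
  · have hn0 : n = 0 := by omega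
    subst hn0
    rw [pvCnt_zero]
    split_ifs <;> first | rfl | omega

lemma stepA (n : Int) (h : 1 ≤ n) : pvLoopBody (pvCounts (n-1)) n = pvCounts n := by
  unfold pvLoopBody
  rw [PySem.List.len_eq, pvCounts_length]
  by_cases hg : 1 ≤ pvGetDigitSum n ∧ pvGetDigitSum n < (37:Nat)
  · rw [if_pos (by exact_mod_cast hg)]
    have hds0 : 0 ≤ pvGetDigitSum n := by omega
    have hds37 : pvGetDigitSum n < 37 := by exact_mod_cast hg.2
    rw [PySem.List.pySetD_of_nonneg _ _ hds0,
        PySem.List.pyGetD_eq_getElem (h0 := hds0)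
          (h1 := by rw [pvCounts_length]; exact_mod_cast hds37)]
    apply List.ext_getElem (by rw [List.length_set, pvCounts_length, pvCounts_length])
    intro i h1 h2
    have hi : i < 37 := by rwa [List.length_set, pvCounts_length] at h1
    rw [List.getElem_set]
    have hstep : ∀ j : Int, pvCnt n j = pvCnt (n-1) j + (if pvGetDigitSum n = j then 1 else 0) :=
      fun j => pvCnt_step n h j
    by_cases he : (pvGetDigitSum n).toNat = i
    · rw [if_pos he, pvCounts_get n i hi, pvCounts_get (n-1) (pvGetDigitSum n).toNat (by omega)]
      rw [if_neg (by omega), if_neg (by omega), hstep, if_pos (by omega), he,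
          show ((i:Nat) : Int) = pvGetDigitSum n by omega]
    · rw [if_neg he, pvCounts_get n i hi, pvCounts_get (n-1) i hi]
      rcases Nat.eq_zero_or_pos i with hi0 | hi1
      · simp [hi0]
      · rw [if_neg (by omega), if_neg (by omega), hstep, if_neg (by omega)]
        ring
  · rw [if_neg (by exact_mod_cast hg)]
    apply List.ext_getElem (by rw [pvCounts_length, pvCounts_length])
    intro i h1 h2
    have hi : i < 37 := by rwa [pvCounts_length] at h1
    rw [pvCounts_get (n-1) i hi, pvCounts_get n i hi]
    rcases Nat.eq_zero_or_pos i with hi0 | hi1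
    · simp [hi0]
    · rw [if_neg (by omega), if_neg (by omega), pvCnt_step n h, if_neg (by omega)]
      ring

lemma loopA (n : Int) :
    (PySem.List.pyRange 1 (n+1) 1).foldl pvLoopBody (List.replicate 37 0) = pvCounts n := by
  generalize hk : n.toNat = k
  induction k using Nat.strong_induction_on generalizing n with
  | _ k IH =>
  rcases (by omega : n ≤ 0 ∨ 0 < n) with hn | hn
  · rw [PySem.List.pyRange_one_eq_nil (by omega), List.foldl_nil, pvCounts_nonpos n hn]
  · rw [PySem.List.pyRange_one_succ_right (by omega : (1:Int) ≤ n), List.foldl_append]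
    have hprev : PySem.List.pyRange 1 n 1 = PySem.List.pyRange 1 ((n-1)+1) 1 := by norm_num
    rw [hprev, IH (n-1).toNat (by omega) (n-1) rfl, List.foldl_cons, List.foldl_nil]
    exact stepA n (by omega)

-- closed form of A's single-pass max-and-count scan, for a nonnegative running max
lemma scanA (l : List Int) : ∀ (m c : Int), 0 ≤ m → (∀ x ∈ l, 0 ≤ x) →
    l.foldl pvScanBody (m, c) =
      (l.foldl max m,
       if l.foldl max m = 0 then c
       else (if l.foldl max m = m then c else 0) + (l.count (l.foldl max m) : Int)) := by
  induction l with
  | nil =>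
    intro m c hm _
    simp
  | cons a t IH =>
    intro m c hm hx
    have ha : 0 ≤ a := hx a (by simp)
    have hxt : ∀ x ∈ t, 0 ≤ x := fun x h => hx x (by simp [h])
    rw [List.foldl_cons, List.foldl_cons]
    by_cases h1 : a > m
    · have hmax : max m a = a := max_eq_right (le_of_lt h1)
      have hM := (PySem.List.le_foldl_max t a).1
      rw [show pvScanBody (m, c) a = (a, 1) by simp [pvScanBody, h1]]
      rw [IH a 1 (by omega) hxt, hmax]
      simp only [List.count_cons, beq_iff_eq, Prod.mk.injEq]
      refine ⟨trivial, ?_⟩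
      push_cast
      split_ifs <;> omega
    · have hmax : max m a = m := max_eq_left (by omega)
      have hM := (PySem.List.le_foldl_max t m).1
      by_cases h2 : a = m
      · by_cases hm0 : m > 0
        · rw [show pvScanBody (m, c) a = (m, c + 1) by simp [pvScanBody, h2, hm0]]
          rw [IH m (c + 1) hm hxt, hmax]
          simp only [List.count_cons, beq_iff_eq, Prod.mk.injEq]
          refine ⟨trivial, ?_⟩
          push_cast
          split_ifs <;> omega
        · rw [show pvScanBody (m, c) a = (m, c) by simp [pvScanBody, h2, hm0]]
          rw [IH m c hm hxt, hmax]
          simp only [List.count_cons, beq_iff_eq, Prod.mk.injEq]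
          refine ⟨trivial, ?_⟩
          push_cast
          split_ifs <;> omega
      · rw [show pvScanBody (m, c) a = (m, c) by simp [pvScanBody, h1, h2]]
        rw [IH m c hm hxt, hmax]
        simp only [List.count_cons, beq_iff_eq, Prod.mk.injEq]
        refine ⟨trivial, ?_⟩
        push_cast
        split_ifs <;> omega

-- ===== VERDICT (by name: the statement is the Claim_ definition above) =====
theorem countLargestGroup_single_pass_spec : Claim_equal_countLargestGroup_single_pass := by
  intro n _
  unfold Spec_countLargestGroup_single_pass
  unfold countLargestGroup_single_pass countLargestGroup_single_pass_alt
  dsimp only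
  rw [loopA n, PySem.List.slice_from_one]
  have hcounts : (PySem.List.pyRange 1 37 1).map (fun s => pvCnt n s)
      = (List.range 36).map (fun (j : Nat) => pvCnt n (1 + (j : Int))) := by
    rw [PySem.List.pyRange_one, List.map_map]
    rfl
  rw [hcounts]
  have htail : (pvCounts n).tail = (List.range 36).map (fun (j : Nat) => pvCnt n (1 + (j : Int))) := rfl
  rw [htail]
  set L := (List.range 36).map (fun (j : Nat) => pvCnt n (1 + (j : Int))) with hL
  have hall : ∀ y ∈ L, 0 ≤ y := by
    intro y hy
    rw [hL] at hy
    obtain ⟨j, _, rfl⟩ := List.mem_map.mp hy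
    exact pvCnt_nonneg _ _
  have hne : L ≠ [] := by rw [hL]; simp
  obtain ⟨x, t, hxt⟩ := List.exists_cons_of_ne_nil hne
  have hx0 : 0 ≤ x := hall x (by rw [hxt]; exact List.mem_cons_self)
  rw [hxt] at hall ⊢
  rw [scanA (x :: t) 0 0 (le_refl 0) hall, PySem.List.max?_id_cons]
  have hfold : (x :: t).foldl max 0 = t.foldl max x := by
    rw [List.foldl_cons, max_eq_right hx0]
  have hM0 : 0 ≤ t.foldl max x := le_trans hx0 (PySem.List.le_foldl_max t x).1
  rw [hfold]
  rcases (by omega : t.foldl max x = 0 ∨ 0 < t.foldl max x) with h0 | hpos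
  · simp [h0]
  · have hM : t.foldl max x ≠ 0 := by omega
    simp [hM, hpos, PySem.List.count_eq]
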